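-- pv_equiv track=rewrite | github.com/atlanswer/AoC | 2024/python/day2/part2.py | check_safe_dampened
-- ===== SOURCE A (Python) =====
-- from typing import Callable, Literal, TypeVar
--
-- Trend = Literal["increasing", "decreasing", "unknown"]
--
-- def check_safe_dampened(
--     levels: list[int],
--     idx: int = 1,
--     pre_trend: Trend = "unknown",
--     has_bad: bool = False,
-- ) -> bool:
--     if idx >= len(levels):
--         return True
--
--     diff = levels[idx] - levels[idx - 1]
--     cur_trend: Trend
--
--     if diff > 0:
--         cur_trend = "increasing"
--     else:
--         cur_trend = "decreasing"
--
--     if (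
--         abs(diff) < 1
--         or abs(diff) > 3
--         or cur_trend != pre_trend
--         and pre_trend != "unknown"
--     ):
--         if has_bad:
--             return False
--         for i in range(len(levels)):
--             if check_safe_dampened(levels[:i] + levels[i + 1 :], has_bad=True):
--                 return True
--         return False
--
--     return check_safe_dampened(levels, idx + 1, cur_trend, has_bad)
-- ===== SOURCE B (Python) =====
-- def _strict_safe(levels):
--     return all(1 <= b - a <= 3 for a, b in zip(levels, levels[1:])) or all(
--         -3 <= b - a <= -1 for a, b in zip(levels, levels[1:])
--     )
--
--
-- def check_safe_dampened(
--     levels,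
--     idx=1,
--     pre_trend="unknown",
--     has_bad=False,
-- ):
--     n = len(levels)
--     trend = pre_trend
--     i = idx
--     while i < n:
--         d = levels[i] - levels[i - 1]
--         cur = "increasing" if d > 0 else "decreasing"
--         if not (1 <= abs(d) <= 3) or (trend != "unknown" and cur != trend):
--             if has_bad:
--                 return False
--             return any(
--                 _strict_safe(levels[:j] + levels[j + 1:]) for j in range(n)
--             )
--         trend = cur
--         i += 1
--     return True
-- ===== Notes on version B (the rewrite author's own statement) =====
-- stated objective: simpler
-- what changed: A's per-step recursion (which recurses even for the plain scan and re-enters itself for every dampener candidate) is replaced by an iterative while-loop scan plus a non-recursive strict checker that tests 'all diffs in [1,3] or all diffs in [-3,-1]' over a zipped diff list.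
import Mathlib
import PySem

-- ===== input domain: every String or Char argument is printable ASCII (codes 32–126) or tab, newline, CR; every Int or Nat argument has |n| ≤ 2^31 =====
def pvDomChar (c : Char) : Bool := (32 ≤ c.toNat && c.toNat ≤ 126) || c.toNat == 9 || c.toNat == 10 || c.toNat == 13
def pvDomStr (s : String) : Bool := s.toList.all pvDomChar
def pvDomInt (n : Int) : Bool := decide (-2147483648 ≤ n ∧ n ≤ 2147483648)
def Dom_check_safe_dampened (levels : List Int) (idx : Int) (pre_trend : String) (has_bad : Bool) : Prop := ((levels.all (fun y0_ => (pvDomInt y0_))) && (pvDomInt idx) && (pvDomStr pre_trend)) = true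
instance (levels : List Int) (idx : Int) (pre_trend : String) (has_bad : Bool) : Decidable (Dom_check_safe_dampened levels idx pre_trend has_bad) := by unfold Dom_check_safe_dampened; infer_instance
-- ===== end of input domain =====

-- B replaces A's per-step recursion (which re-recurses for the dampener) by an iterative scan plus a
-- non-recursive "all diffs in [1,3] or all in [-3,-1]" strict checker; same O(n^2) worst case, simpler.

-- ===== PORT A =====
-- literal transliteration of A's recursion; pyGet? none (Python IndexError) is excluded by Pre_
def check_safe_dampened (levels : List Int) (idx : Int) (pre_trend : String) (has_bad : Bool) : Bool :=
  if (levels.length : Int) ≤ idx then true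
  else
    match PySem.List.pyGet? levels idx, PySem.List.pyGet? levels (idx - 1) with
    | some a, some b =>
      let diff := a - b
      let cur_trend := if 0 < diff then "increasing" else "decreasing"
      if |diff| < 1 ∨ 3 < |diff| ∨ (cur_trend ≠ pre_trend ∧ pre_trend ≠ "unknown") then
        if has_bad then false
        else (List.range levels.length).attach.any (fun i =>
          check_safe_dampened
            (PySem.List.slice levels none (some (i.1 : Int)) ++
             PySem.List.slice levels (some ((i.1 : Int) + 1)) none) 1 "unknown" true)
      else check_safe_dampened levels (idx + 1) cur_trend has_bad
    | _, _ => false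
termination_by (levels.length, ((levels.length : Int) - idx).toNat)
decreasing_by
  · have hlt : i.1 < levels.length := List.mem_range.mp i.2
    apply Prod.Lex.left
    rw [List.length_append, PySem.List.slice_to_natCast,
        show ((i.1 : Int) + 1) = (((i.1 + 1 : Nat)) : Int) by push_cast; ring,
        PySem.List.slice_from_natCast, List.length_take, List.length_drop]
    omega
  · apply Prod.Lex.right
    omega

-- ===== PORT B =====
-- Source B's _strict_safe: diffs via zip, then two `all` passes
def pyStrictSafe (levels : List Int) : Bool :=
  (levels.zip (levels.drop 1)).all (fun p => decide (1 ≤ p.2 - p.1 ∧ p.2 - p.1 ≤ 3)) ||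
  (levels.zip (levels.drop 1)).all (fun p => decide (-3 ≤ p.2 - p.1 ∧ p.2 - p.1 ≤ -1))

-- Source B's while loop; the `_, _ => true` branch is where Python B raises IndexError (outside Pre_)
def pyBLoop (levels : List Int) (n : Int) (trend : String) (i : Int) (has_bad : Bool) : Bool :=
  if i < n then
    match PySem.List.pyGet? levels i with
    | none => true
    | some a =>
      match PySem.List.pyGet? levels (i - 1) with
      | none => true
      | some b =>
        let d := a - b
        let cur := if 0 < d then "increasing" else "decreasing"
        if ¬(1 ≤ |d| ∧ |d| ≤ 3) ∨ (trend ≠ "unknown" ∧ cur ≠ trend) then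
          if has_bad then false
          else (List.range n.toNat).any (fun j => pyStrictSafe (levels.take j ++ levels.drop (j + 1)))
        else pyBLoop levels n cur (i + 1) has_bad
  else true
termination_by (n - i).toNat
decreasing_by omega

def check_safe_dampened_alt (levels : List Int) (idx : Int) (pre_trend : String) (has_bad : Bool) : Bool :=
  pyBLoop levels (levels.length : Int) pre_trend idx has_bad

-- ===== PRECONDITION & SPEC =====
-- Pre_ excludes exactly the inputs where Python A raises IndexError (levels[idx] or levels[idx-1]
-- out of range, i.e. idx < len(levels) and idx < 1 - len(levels)); Python B raises there as well.
def Pre_check_safe_dampened (levels : List Int) (idx : Int) (pre_trend : String) (has_bad : Bool) : Prop :=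
  (levels.length : Int) ≤ idx ∨ 1 - (levels.length : Int) ≤ idx
instance (levels : List Int) (idx : Int) (pre_trend : String) (has_bad : Bool) : Decidable (Pre_check_safe_dampened levels idx pre_trend has_bad) := by unfold Pre_check_safe_dampened; infer_instance

def pvWitness_check_safe_dampened : List Int × Int × String × Bool := ([1, 2, 4, 5], 1, "unknown", false)

def Spec_check_safe_dampened (levels : List Int) (idx : Int) (pre_trend : String) (has_bad : Bool) (out : Bool) : Prop := out = check_safe_dampened_alt levels idx pre_trend has_bad
instance (levels : List Int) (idx : Int) (pre_trend : String) (has_bad : Bool) (out : Bool) : Decidable (Spec_check_safe_dampened levels idx pre_trend has_bad out) := by unfold Spec_check_safe_dampened; infer_instance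

-- ===== CLAIM (what is proved, stated in full; the proofs are below) =====
def Claim_equal_check_safe_dampened : Prop := ∀ (levels : List Int) (idx : Int) (pre_trend : String) (has_bad : Bool), Dom_check_safe_dampened levels idx pre_trend has_bad → Pre_check_safe_dampened levels idx pre_trend has_bad → Spec_check_safe_dampened levels idx pre_trend has_bad (check_safe_dampened levels idx pre_trend has_bad)

-- ===== LEMMAS AND PROOFS =====

-- the diff list Source B's _strict_safe builds
def diffList (xs : List Int) : List Int := (xs.zip (xs.drop 1)).map (fun p => p.2 - p.1)

-- A's per-step violation test, abstracted over the trend state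
def scanD : String → List Int → Bool
  | _, [] => true
  | t, d :: ds =>
    let cur := if 0 < d then "increasing" else "decreasing"
    if |d| < 1 ∨ 3 < |d| ∨ (cur ≠ t ∧ t ≠ "unknown") then false else scanD cur ds

lemma length_diffList (xs : List Int) : (diffList xs).length = xs.length - 1 := by
  simp [diffList]

lemma scanD_inc (ds : List Int) :
    scanD "increasing" ds = ds.all (fun d => decide (1 ≤ d ∧ d ≤ 3)) := by
  induction ds with
  | nil => rfl
  | cons d ds ih =>
    by_cases h0 : 0 < d
    · have ha : |d| = d := abs_of_pos h0
      by_cases h3 : d ≤ 3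
      · simp [scanD, h0, ha, show ¬ d < 1 by omega, show ¬ 3 < d by omega,
              show 1 ≤ d by omega, h3, ih]
      · simp [scanD, h0, ha, show 3 < d by omega, h3]
    · have ha : |d| = -d := abs_of_nonpos (by omega)
      simp [scanD, h0, ha, show ¬ 1 ≤ d by omega]

lemma scanD_dec (ds : List Int) :
    scanD "decreasing" ds = ds.all (fun d => decide (-3 ≤ d ∧ d ≤ -1)) := by
  induction ds with
  | nil => rfl
  | cons d ds ih =>
    by_cases h0 : 0 < d
    · have ha : |d| = d := abs_of_pos h0
      simp [scanD, h0, ha, show ¬ d ≤ -1 by omega]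
    · have ha : |d| = -d := abs_of_nonpos (by omega)
      by_cases h1 : d = 0
      · simp [scanD, h1]
      · by_cases h3 : -3 ≤ d
        · simp [scanD, h0, ha, show ¬ -d < 1 by omega, show ¬ 3 < -d by omega,
                h3, show d ≤ -1 by omega, ih]
        · simp [scanD, h0, ha, show 3 < -d by omega, show ¬ -3 ≤ d by omega]

lemma scanD_unknown (ds : List Int) :
    scanD "unknown" ds
      = (ds.all (fun d => decide (1 ≤ d ∧ d ≤ 3)) || ds.all (fun d => decide (-3 ≤ d ∧ d ≤ -1))) := by
  cases ds with
  | nil => rfl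
  | cons d ds =>
    by_cases h0 : 0 < d
    · have ha : |d| = d := abs_of_pos h0
      by_cases h3 : d ≤ 3
      · simp [scanD, h0, ha, show ¬ d < 1 by omega, show ¬ 3 < d by omega,
              show 1 ≤ d by omega, h3, show ¬ d ≤ -1 by omega, scanD_inc]
      · simp [scanD, h0, ha, show 3 < d by omega, h3, show ¬ d ≤ -1 by omega]
    · have ha : |d| = -d := abs_of_nonpos (by omega)
      by_cases h1 : d = 0
      · simp [scanD, h1]
      · by_cases h3 : -3 ≤ d
        · simp [scanD, h0, ha, show ¬ -d < 1 by omega, show ¬ 3 < -d by omega,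
                h3, show d ≤ -1 by omega, show ¬ 1 ≤ d by omega, scanD_dec]
        · simp [scanD, h0, ha, show 3 < -d by omega, show ¬ -3 ≤ d by omega,
                show ¬ 1 ≤ d by omega]

lemma scanD_unknown_strict (xs : List Int) :
    scanD "unknown" (diffList xs) = pyStrictSafe xs := by
  rw [scanD_unknown]
  simp only [diffList, List.all_map]
  rfl

-- A's strict scan (has_bad = true) from position k+1 is scanD over the diff suffix
lemma strict_scan_eq (m : Nat) : ∀ (xs : List Int) (k : Nat) (t : String),
    xs.length ≤ k + 1 + m →
    check_safe_dampened xs ((k : Int) + 1) t true = scanD t ((diffList xs).drop k) := by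
  induction m with
  | zero =>
    intro xs k t hm
    have hle : (xs.length : Int) ≤ (k : Int) + 1 := by exact_mod_cast Nat.le_of_lt_succ (by omega)
    rw [check_safe_dampened]
    have hnil : (diffList xs).drop k = [] := by
      apply List.drop_eq_nil_of_le
      rw [length_diffList]; omega
    simp [hle, hnil, scanD]
  | succ m ih =>
    intro xs k t hm
    by_cases hle : (xs.length : Int) ≤ (k : Int) + 1
    · rw [check_safe_dampened]
      have hk : xs.length ≤ k + 1 := by exact_mod_cast hle
      have hnil : (diffList xs).drop k = [] := by
        apply List.drop_eq_nil_of_le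
        rw [length_diffList]; omega
      simp [hle, hnil, scanD]
    · have hk1 : k + 1 < xs.length := by
        have : ¬ xs.length ≤ k + 1 := by
          intro h; exact hle (by exact_mod_cast h)
        omega
      have hg1 : PySem.List.pyGet? xs ((k : Int) + 1) = some xs[k + 1] := by
        rw [show ((k : Int) + 1) = ((k + 1 : Nat) : Int) by push_cast; ring,
            PySem.List.pyGet?_natCast]
        simp [hk1]
      have hg0 : PySem.List.pyGet? xs ((k : Int) + 1 - 1) = some xs[k] := by
        rw [show ((k : Int) + 1 - 1) = ((k : Nat) : Int) by ring,
            PySem.List.pyGet?_natCast]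
        simp [show k < xs.length by omega]
      have hdk : k < (diffList xs).length := by rw [length_diffList]; omega
      have hdrop : (diffList xs).drop k = (xs[k + 1] - xs[k]) :: (diffList xs).drop (k + 1) := by
        rw [List.drop_eq_getElem_cons hdk]
        simp [diffList, List.getElem_zip]
      rw [check_safe_dampened, hdrop]
      simp only [hle, if_false, hg1, hg0, scanD]
      by_cases hviol : |xs[k + 1] - xs[k]| < 1 ∨ 3 < |xs[k + 1] - xs[k]| ∨
          ((if 0 < xs[k + 1] - xs[k] then "increasing" else "decreasing") ≠ t ∧ t ≠ "unknown")
      · rw [if_pos hviol, if_pos hviol]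
        simp
      · rw [if_neg hviol, if_neg hviol]
        have := ih xs (k + 1) (if 0 < xs[k + 1] - xs[k] then "increasing" else "decreasing") (by omega)
        rw [show ((k + 1 : Nat) : Int) + 1 = (k : Int) + 1 + 1 by push_cast; ring] at this
        exact this

-- main loop correspondence: A's recursion equals B's while loop, given indices stay in range
lemma main_loop (m : Nat) : ∀ (levels : List Int) (idx : Int) (t : String) (hb : Bool),
    (levels.length : Int) - idx ≤ (m : Int) →
    ((levels.length : Int) ≤ idx ∨ 1 - (levels.length : Int) ≤ idx) →
    check_safe_dampened levels idx t hb = pyBLoop levels (levels.length : Int) t idx hb := by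
  induction m with
  | zero =>
    intro levels idx t hb hm hpre
    have hle : (levels.length : Int) ≤ idx := by omega
    rw [check_safe_dampened, pyBLoop]
    simp [hle, show ¬ idx < (levels.length : Int) by omega]
  | succ m ih =>
    intro levels idx t hb hm hpre
    by_cases hle : (levels.length : Int) ≤ idx
    · rw [check_safe_dampened, pyBLoop]
      simp [hle, show ¬ idx < (levels.length : Int) by omega]
    · have hlt : idx < (levels.length : Int) := by omega
      have hpre' : 1 - (levels.length : Int) ≤ idx := by omega
      have h1 : PySem.List.pyGet? levels idx ≠ none := by
        rw [Ne, PySem.List.pyGet?_eq_none_iff, not_not]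
        simp [PySem.Raise.InRange]; omega
      have h0 : PySem.List.pyGet? levels (idx - 1) ≠ none := by
        rw [Ne, PySem.List.pyGet?_eq_none_iff, not_not]
        simp [PySem.Raise.InRange]; omega
      obtain ⟨a, ha⟩ := Option.ne_none_iff_exists'.mp h1
      obtain ⟨b, hbv⟩ := Option.ne_none_iff_exists'.mp h0
      rw [check_safe_dampened, pyBLoop]
      simp only [hle, if_false, hlt, if_true, ha, hbv]
      set d := a - b with hd
      set cur := if 0 < d then "increasing" else "decreasing" with hcur
      have hcond : (|d| < 1 ∨ 3 < |d| ∨ (cur ≠ t ∧ t ≠ "unknown"))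
          ↔ (¬(1 ≤ |d| ∧ |d| ≤ 3) ∨ (t ≠ "unknown" ∧ cur ≠ t)) := by
        constructor
        · rintro (h | h | ⟨h1, h2⟩)
          · left; omega
          · left; omega
          · right; exact ⟨h2, h1⟩
        · rintro (h | ⟨h1, h2⟩)
          · by_cases hx : |d| < 1
            · left; exact hx
            · right; left; omega
          · right; right; exact ⟨h2, h1⟩
      by_cases hviol : |d| < 1 ∨ 3 < |d| ∨ (cur ≠ t ∧ t ≠ "unknown")
      · simp only [if_pos hviol, if_pos (hcond.mp hviol)]
        cases hb with
        | true => rfl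
        | false =>
          have hattach : ((List.range levels.length).attach.any fun i =>
                check_safe_dampened
                  (PySem.List.slice levels none (some (i.1 : Int)) ++
                   PySem.List.slice levels (some ((i.1 : Int) + 1)) none) 1 "unknown" true)
              = (List.range levels.length).any (fun j =>
                check_safe_dampened
                  (PySem.List.slice levels none (some (j : Int)) ++
                   PySem.List.slice levels (some ((j : Int) + 1)) none) 1 "unknown" true) := by
            rw [Bool.eq_iff_iff]; simp
          rw [hattach, Int.toNat_natCast]
          apply List.any_congr rfl
          intro j
          have hsl : PySem.List.slice levels none (some (j : Int)) ++
              PySem.List.slice levels (some ((j : Int) + 1)) none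
              = levels.take j ++ levels.drop (j + 1) := by
            rw [PySem.List.slice_to_natCast,
                show ((j : Int) + 1) = ((j + 1 : Nat) : Int) by push_cast; ring,
                PySem.List.slice_from_natCast]
          rw [hsl, show (1 : Int) = ((0 : Nat) : Int) + 1 by norm_num,
              strict_scan_eq (levels.take j ++ levels.drop (j + 1)).length _ 0 _ (by omega),
              List.drop_zero, scanD_unknown_strict]
      · simp only [if_neg hviol, if_neg (fun h => hviol (hcond.mpr h))]
        exact ih levels (idx + 1) cur hb (by omega) (Or.inr (by omega))

-- ===== VERDICT (by name: the statement is the Claim_ definition above) =====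
theorem check_safe_dampened_spec : Claim_equal_check_safe_dampened := by
  intro levels idx pre_trend has_bad _ hpre
  unfold Spec_check_safe_dampened check_safe_dampened_alt
  exact main_loop ((levels.length : Int) - idx).toNat levels idx pre_trend has_bad (by omega) hpre
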